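-- pv_equiv track=rewrite | github.com/peejh/coding-practice | HackerRank/Problem Solving/algorithms/string_anagram.py | anagram_v2
-- ===== SOURCE A (Python) =====
-- from collections import Counter
--
-- def anagram_v2(s):
--     # if length of s is odd, it cannot be split evenly
--     if len(s) % 2 == 1:
--         return -1
--
--     half = len(s) // 2
--
--     # STEP 1: count letters in each half
--     half1 = Counter(s[:half])
--     half2 = Counter(s[half:])
--
--     # STEP 2: count the number of changes that has to be made in either half
--     change_count = 0
--
--     for k, v1 in half1.items():
--         if k in half2:
--             v2 = half2[k]
--             change_count += (v1 - v2) if v1 > v2 else 0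
--         else:
--             change_count += v1
--
--     return change_count
-- ===== SOURCE B (Python) =====
-- from collections import Counter
--
-- def anagram_v2(s):
--     # greedy matching: try to match each char of the first half against the
--     # multiset of the second half; unmatched chars must be changed
--     if len(s) % 2 == 1:
--         return -1
--     half = len(s) // 2
--     avail = Counter(s[half:])
--     matched = 0
--     for ch in s[:half]:
--         if avail[ch] > 0:
--             avail[ch] -= 1
--             matched += 1
--     return half - matched
-- ===== Notes on version B (the rewrite author's own statement) =====
-- stated objective: alternative
-- what changed: Replaces the two-Counter comparison loop (sum of positive count excesses over the first half's counter items) by a single greedy pass over the first half that consumes matches from a counter of the second half and returns half minus the number of matches.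
import Mathlib
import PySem

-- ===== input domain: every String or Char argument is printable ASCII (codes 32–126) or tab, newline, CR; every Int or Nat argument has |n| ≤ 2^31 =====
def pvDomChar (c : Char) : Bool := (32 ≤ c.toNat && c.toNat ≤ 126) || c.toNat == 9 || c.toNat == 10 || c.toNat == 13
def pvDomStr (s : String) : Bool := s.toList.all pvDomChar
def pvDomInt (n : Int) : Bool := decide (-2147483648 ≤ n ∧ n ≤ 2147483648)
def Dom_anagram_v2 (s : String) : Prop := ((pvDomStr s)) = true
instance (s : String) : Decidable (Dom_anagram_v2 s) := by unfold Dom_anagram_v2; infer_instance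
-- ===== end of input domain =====

-- B replaces A's two-Counter comparison by a greedy matching pass over the first
-- half against a counter of the second half (alternative algorithm, same cost).

-- ===== PORT A =====
def anagram_v2 (s : String) : Int :=
  if PySem.Int.mod (PySem.Str.len s) 2 == 1 then -1
  else
    let half : Int := PySem.Int.floordiv (PySem.Str.len s) 2
    let half1 := PySem.Dict.counter (PySem.List.slice s.toList none (some half))
    let half2 := PySem.Dict.counter (PySem.List.slice s.toList (some half) none)
    half1.items.foldl (fun change_count kv =>
      if half2.contains kv.1 then
        let v2 := half2.getD kv.1 0
        change_count + (if kv.2 > v2 then kv.2 - v2 else 0)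
      else change_count + kv.2) 0

-- ===== PORT B =====
def anagram_v2_alt (s : String) : Int :=
  if PySem.Int.mod (PySem.Str.len s) 2 == 1 then -1
  else
    let half : Int := PySem.Int.floordiv (PySem.Str.len s) 2
    let res := (PySem.List.slice s.toList none (some half)).foldl
      (fun (st : PySem.Dict Char Int × Int) ch =>
        if st.1.getD ch 0 > 0 then (st.1.modify ch 0 (· - 1), st.2 + 1) else st)
      (PySem.Dict.counter (PySem.List.slice s.toList (some half) none), 0)
    half - res.2

-- ===== PRECONDITION & SPEC =====
def Spec_anagram_v2 (s : String) (out : Int) : Prop := out = anagram_v2_alt s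
instance (s : String) (out : Int) : Decidable (Spec_anagram_v2 s out) := by unfold Spec_anagram_v2; infer_instance

-- ===== CLAIM (what is proved, stated in full; the proofs are below) =====
def Claim_equal_anagram_v2 : Prop := ∀ (s : String), Dom_anagram_v2 s → Spec_anagram_v2 s (anagram_v2 s)

-- ===== LEMMAS AND PROOFS =====

-- the greedy matcher of B, abstracted over the availability function
def pvGreedy : List Char → (Char → Int) → Int
  | [], _ => 0
  | c :: t, f => if 0 < f c then 1 + pvGreedy t (Function.update f c (f c - 1)) else pvGreedy t f

-- the matched count ∑_{distinct c of l} min(count_l c, f c)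
def pvM (l : List Char) (f : Char → Int) : Int :=
  ∑ c ∈ l.toFinset, min ((l.count c : Int)) (f c)

lemma pvB_fold (l : List Char) (d : PySem.Dict Char Int) (acc : Int) :
    (l.foldl (fun (st : PySem.Dict Char Int × Int) ch =>
        if st.1.getD ch 0 > 0 then (st.1.modify ch 0 (· - 1), st.2 + 1) else st) (d, acc)).2
      = acc + pvGreedy l (fun c => d.getD c 0) := by
  induction l generalizing d acc with
  | nil => simp [pvGreedy]
  | cons ch t ih =>
    simp only [List.foldl_cons, pvGreedy]
    by_cases h : 0 < d.getD ch 0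
    · rw [if_pos h, if_pos h, ih]
      have : (fun c => (d.modify ch 0 (· - 1)).getD c 0)
           = Function.update (fun c => d.getD c 0) ch (d.getD ch 0 - 1) := by
        funext c
        by_cases hc : c = ch
        · subst hc; simp [PySem.Dict.getD_modify_self, Function.update]
        · simp [PySem.Dict.getD_modify_of_ne _ _ _ hc, Function.update, hc]
      rw [this]; ring
    · rw [if_neg h, if_neg h, ih]

lemma pvGreedy_eq_M (l : List Char) (f : Char → Int) (hf : ∀ c, 0 ≤ f c) :
    pvGreedy l f = pvM l f := by
  induction l generalizing f with
  | nil => simp [pvGreedy, pvM]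
  | cons ch t ih =>
    simp only [pvGreedy]
    by_cases h : 0 < f ch
    · rw [if_pos h]
      set f' := Function.update f ch (f ch - 1) with hf'
      have hf'nn : ∀ c, 0 ≤ f' c := by
        intro c; by_cases hc : c = ch
        · subst hc; simp [hf']; omega
        · simpa [hf', Function.update, hc] using hf c
      rw [ih f' hf'nn]
      -- both sides as sums over insert ch t.toFinset
      have key : pvM (ch :: t) f = 1 + pvM t f' := by
        unfold pvM
        rw [List.toFinset_cons]
        by_cases hm : ch ∈ t.toFinset
        · rw [Finset.insert_eq_self.mpr hm]
          rw [← Finset.add_sum_erase _ _ hm, ← Finset.add_sum_erase _ _ hm]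
          have h1 : min (((ch :: t).count ch : Int)) (f ch)
              = 1 + min ((t.count ch : Int)) (f' ch) := by
            simp [hf']
            omega
          have h2 : ∀ c ∈ t.toFinset.erase ch,
              min (((ch :: t).count c : Int)) (f c) = min ((t.count c : Int)) (f' c) := by
            intro c hc
            have hne : c ≠ ch := (Finset.mem_erase.mp hc).1
            simp [Ne.symm hne, hf', Function.update_of_ne hne]
          rw [Finset.sum_congr rfl h2, h1]; ring
        · rw [Finset.sum_insert hm]
          have h1 : min (((ch :: t).count ch : Int)) (f ch) = 1 := by
            have : t.count ch = 0 := by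
              simpa using (List.count_eq_zero.mpr (by simpa using hm))
            simp [this]
            omega
          have h2 : ∀ c ∈ t.toFinset,
              min (((ch :: t).count c : Int)) (f c) = min ((t.count c : Int)) (f' c) := by
            intro c hc
            have hne : c ≠ ch := by rintro rfl; exact hm hc
            simp [Ne.symm hne, hf', Function.update_of_ne hne]
          rw [Finset.sum_congr rfl h2, h1]
      rw [key]
    · rw [if_neg h]
      have hch : f ch = 0 := le_antisymm (by omega) (hf ch)
      rw [ih f hf]
      have key : pvM (ch :: t) f = pvM t f := by
        unfold pvM
        rw [List.toFinset_cons]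
        by_cases hm : ch ∈ t.toFinset
        · rw [Finset.insert_eq_self.mpr hm]
          rw [← Finset.add_sum_erase _ _ hm, ← Finset.add_sum_erase _ _ hm]
          have h1 : min (((ch :: t).count ch : Int)) (f ch)
              = min ((t.count ch : Int)) (f ch) := by
            simp [hch]
            positivity
          have h2 : ∀ c ∈ t.toFinset.erase ch,
              min (((ch :: t).count c : Int)) (f c) = min ((t.count c : Int)) (f c) := by
            intro c hc
            have hne : c ≠ ch := (Finset.mem_erase.mp hc).1
            simp [Ne.symm hne]
          rw [Finset.sum_congr rfl h2, h1]
        · rw [Finset.sum_insert hm]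
          have h1 : min (((ch :: t).count ch : Int)) (f ch) = 0 := by
            simp [hch]
            positivity
          have h2 : ∀ c ∈ t.toFinset,
              min (((ch :: t).count c : Int)) (f c) = min ((t.count c : Int)) (f c) := by
            intro c hc
            have hne : c ≠ ch := by rintro rfl; exact hm hc
            simp [Ne.symm hne]
          rw [Finset.sum_congr rfl h2, h1]; ring
      rw [key]

-- A's loop over the counter items equals a sum of excesses over the distinct chars
lemma pvA_sum (h1 h2 : List Char) :
    (PySem.Dict.counter h1).items.foldl (fun change_count kv =>
      if (PySem.Dict.counter h2).contains kv.1 then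
        let v2 := (PySem.Dict.counter h2).getD kv.1 0
        change_count + (if kv.2 > v2 then kv.2 - v2 else 0)
      else change_count + kv.2) 0
    = ∑ c ∈ h1.toFinset, ((h1.count c : Int) - min ((h1.count c : Int)) ((h2.count c : Int))) := by
  rw [PySem.Dict.items_counter]
  rw [List.foldl_map]
  have hcongr : ∀ (acc : Int), ∀ c ∈ PySem.Set.ofList h1,
      (fun (change_count : Int) (kv : Char × Int) =>
        if (PySem.Dict.counter h2).contains kv.1 then
          change_count + (if kv.2 > (PySem.Dict.counter h2).getD kv.1 0
            then kv.2 - (PySem.Dict.counter h2).getD kv.1 0 else 0)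
        else change_count + kv.2) acc (c, (h1.count c : Int))
      = acc + ((h1.count c : Int) - min ((h1.count c : Int)) ((h2.count c : Int))) := by
    intro acc c hc
    have hc1 : 1 ≤ h1.count c := List.one_le_count_iff.mpr ((PySem.Set.mem_ofList _ _).mp hc)
    simp only [PySem.Dict.contains_counter, PySem.Dict.getD_counter]
    by_cases hm : h2.contains c
    · have : (h2.contains c) = true := hm
      rw [if_pos this]
      have := Int.natCast_nonneg (h2.count c)
      split_ifs <;> omega
    · have hb : (h2.contains c) = false := by simpa using hm
      rw [if_neg (by simpa using hb)]
      have h0 : h2.count c = 0 := List.count_eq_zero.mpr (by simpa using hb)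
      rw [h0]; push_cast; omega
  calc (PySem.Set.ofList h1).foldl (fun acc c =>
        (fun (change_count : Int) (kv : Char × Int) =>
          if (PySem.Dict.counter h2).contains kv.1 then
            change_count + (if kv.2 > (PySem.Dict.counter h2).getD kv.1 0
              then kv.2 - (PySem.Dict.counter h2).getD kv.1 0 else 0)
          else change_count + kv.2) acc (c, (h1.count c : Int))) 0
      = (PySem.Set.ofList h1).foldl (fun acc c =>
          acc + ((h1.count c : Int) - min ((h1.count c : Int)) ((h2.count c : Int)))) 0 := by
        exact PySem.List.foldl_congr_mem _ _ _ _ hcongr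
    _ = 0 + ((PySem.Set.ofList h1).map (fun c =>
          (h1.count c : Int) - min ((h1.count c : Int)) ((h2.count c : Int)))).sum := by
        exact PySem.List.foldl_add _ _ _
    _ = ∑ c ∈ h1.toFinset, ((h1.count c : Int) - min ((h1.count c : Int)) ((h2.count c : Int))) := by
        rw [zero_add]
        have hperm : (PySem.Set.ofList h1).toFinset = h1.toFinset := by
          apply Finset.ext; intro c
          simp [List.mem_toFinset, PySem.Set.mem_ofList]
        rw [← List.sum_toFinset _ (PySem.Set.nodup_ofList h1), hperm]

-- ===== VERDICT (by name: the statement is the Claim_ definition above) =====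
theorem anagram_v2_spec : Claim_equal_anagram_v2 := by
  intro s _
  show anagram_v2 s = anagram_v2_alt s
  unfold anagram_v2 anagram_v2_alt
  by_cases hodd : PySem.Int.mod (PySem.Str.len s) 2 == 1
  · rw [if_pos hodd, if_pos hodd]
  · simp only [hodd, if_false, Bool.false_eq_true]
    set cs := s.toList with hcs
    have hlen : PySem.Str.len s = (cs.length : Int) := by
      simp [PySem.Str.len_eq, hcs]
    have hhalf : PySem.Int.floordiv (PySem.Str.len s) 2 = ((cs.length / 2 : Nat) : Int) := by
      rw [hlen]; exact_mod_cast PySem.Int.floordiv_natCast cs.length 2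
    set k : Nat := cs.length / 2 with hk
    have heven : cs.length % 2 = 0 := by
      have := hodd
      rw [hlen] at this
      have hmod := PySem.Int.mod_natCast cs.length 2
      simp only [beq_iff_eq] at this
      rw [show ((2:Int)) = ((2:Nat):Int) by norm_num] at this
      rw [hmod] at this
      omega
    rw [hhalf, PySem.List.slice_to_natCast, PySem.List.slice_from_natCast]
    set h1 := cs.take k with hh1
    set h2 := cs.drop k with hh2
    have hlen1 : h1.length = k := by
      rw [hh1, List.length_take]; omega
    rw [pvA_sum h1 h2, pvB_fold]
    rw [pvGreedy_eq_M _ _ (fun c => by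
      rw [PySem.Dict.getD_counter]; exact Int.natCast_nonneg _)]
    have hMeq : pvM h1 (fun c => (PySem.Dict.counter h2).getD c 0)
        = ∑ c ∈ h1.toFinset, min ((h1.count c : Int)) ((h2.count c : Int)) := by
      unfold pvM
      apply Finset.sum_congr rfl
      intro c _
      simp only [PySem.Dict.getD_counter]
    rw [hMeq]
    rw [Finset.sum_sub_distrib]
    have hcount : ∑ c ∈ h1.toFinset, ((h1.count c : Int)) = (k : Int) := by
      rw [← hlen1]
      rw [← Nat.cast_sum]
      exact_mod_cast congrArg (Nat.cast : Nat → Int) (List.sum_toFinset_count_eq_length h1)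
    rw [hcount]
    ring
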